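-- pv_equiv track=rewrite | github.com/pedrosunal1975-cmyk/map_pro | mapper/success_calculator.py | _identify_unmapped_patterns
-- ===== SOURCE A (Python) =====
-- from typing import Dict, Any, List
--
-- COMPLEX_CONCEPT_LENGTH_THRESHOLD = 40
--
-- PATTERN_MISSING_PREFIX = 'missing_prefix'
--
-- PATTERN_COMPLEX_EXTENSIONS = 'complex_extensions'
--
-- PATTERN_UNKNOWN_TERMS = 'unknown_business_terms'
--
-- def _identify_unmapped_patterns(unmapped_concepts: List[str]) -> Dict[str, List[str]]:
--     """
--     Identify patterns in unmapped concepts.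
--
--     Args:
--         unmapped_concepts: List of unmapped concept names
--
--     Returns:
--         Dictionary mapping pattern types to concept lists
--     """
--     patterns = {
--         PATTERN_MISSING_PREFIX: [],
--         PATTERN_COMPLEX_EXTENSIONS: [],
--         PATTERN_UNKNOWN_TERMS: []
--     }
--
--     for concept in unmapped_concepts:
--         if ':' not in concept:
--             patterns[PATTERN_MISSING_PREFIX].append(concept)
--         elif len(concept) > COMPLEX_CONCEPT_LENGTH_THRESHOLD:
--             patterns[PATTERN_COMPLEX_EXTENSIONS].append(concept)
--         else:
--             patterns[PATTERN_UNKNOWN_TERMS].append(concept)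
--
--     return patterns
-- ===== SOURCE B (Python) =====
-- COMPLEX_CONCEPT_LENGTH_THRESHOLD = 40
-- PATTERN_MISSING_PREFIX = 'missing_prefix'
-- PATTERN_COMPLEX_EXTENSIONS = 'complex_extensions'
-- PATTERN_UNKNOWN_TERMS = 'unknown_business_terms'
--
-- def _identify_unmapped_patterns(unmapped_concepts):
--     return {
--         PATTERN_MISSING_PREFIX:
--             [c for c in unmapped_concepts if ':' not in c],
--         PATTERN_COMPLEX_EXTENSIONS:
--             [c for c in unmapped_concepts
--              if ':' in c and len(c) > COMPLEX_CONCEPT_LENGTH_THRESHOLD],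
--         PATTERN_UNKNOWN_TERMS:
--             [c for c in unmapped_concepts
--              if ':' in c and len(c) <= COMPLEX_CONCEPT_LENGTH_THRESHOLD],
--     }
-- ===== Notes on version B (the rewrite author's own statement) =====
-- stated objective: idiomatic
-- what changed: Replaces the mutable-dict single loop with a declarative dict literal of three independent filtering comprehensions, one per bucket, so no dict is built up or mutated.
import Mathlib
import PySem

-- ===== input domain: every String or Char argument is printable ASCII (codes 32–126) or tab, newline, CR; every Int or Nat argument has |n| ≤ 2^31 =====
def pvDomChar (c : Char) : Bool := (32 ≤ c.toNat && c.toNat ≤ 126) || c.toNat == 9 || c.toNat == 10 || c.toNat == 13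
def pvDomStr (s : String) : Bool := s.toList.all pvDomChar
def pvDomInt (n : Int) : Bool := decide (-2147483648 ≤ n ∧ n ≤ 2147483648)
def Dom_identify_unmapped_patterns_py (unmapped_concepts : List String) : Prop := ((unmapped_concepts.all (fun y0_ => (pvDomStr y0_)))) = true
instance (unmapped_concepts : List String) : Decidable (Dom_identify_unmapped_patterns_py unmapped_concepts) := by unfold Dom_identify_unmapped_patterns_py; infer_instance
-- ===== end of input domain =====

-- B replaces A's mutable-dict loop with three independent filters, one per bucket (same cost; objective: idiomatic).

-- ===== PORT A =====
-- literal port: build the dict with the three keys, then one loop appending each concept to its bucket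
def identify_unmapped_patterns_py (unmapped_concepts : List String) : List (String × List String) :=
  (unmapped_concepts.foldl
    (fun patterns concept =>
      if ¬ (PySem.Str.isIn ":" concept) then
        patterns.modify "missing_prefix" [] (· ++ [concept])
      else if PySem.Str.len concept > 40 then
        patterns.modify "complex_extensions" [] (· ++ [concept])
      else
        patterns.modify "unknown_business_terms" [] (· ++ [concept]))
    (((PySem.Dict.empty.insert "missing_prefix" []).insert "complex_extensions" []).insert
      "unknown_business_terms" [])).items

-- ===== PORT B =====
def identify_unmapped_patterns_py_alt (unmapped_concepts : List String) : List (String × List String) :=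
  [("missing_prefix",
      unmapped_concepts.filter (fun c => ¬ PySem.Str.isIn ":" c)),
   ("complex_extensions",
      unmapped_concepts.filter (fun c => PySem.Str.isIn ":" c && decide (PySem.Str.len c > 40))),
   ("unknown_business_terms",
      unmapped_concepts.filter (fun c => PySem.Str.isIn ":" c && decide (PySem.Str.len c ≤ 40)))]

-- ===== PRECONDITION & SPEC =====
def Spec_identify_unmapped_patterns_py (unmapped_concepts : List String) (out : List (String × List String)) : Prop := out = identify_unmapped_patterns_py_alt unmapped_concepts
instance (unmapped_concepts : List String) (out : List (String × List String)) : Decidable (Spec_identify_unmapped_patterns_py unmapped_concepts out) := by unfold Spec_identify_unmapped_patterns_py; infer_instance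

-- ===== CLAIM (what is proved, stated in full; the proofs are below) =====
def Claim_equal_identify_unmapped_patterns_py : Prop := ∀ (unmapped_concepts : List String), Dom_identify_unmapped_patterns_py unmapped_concepts → Spec_identify_unmapped_patterns_py unmapped_concepts (identify_unmapped_patterns_py unmapped_concepts)

-- ===== LEMMAS AND PROOFS =====

-- one step of A's loop on the three-key literal dict, one lemma per branch
theorem pv_step_mp (a b c : List String) (x : String) :
    (PySem.Dict.mk [("missing_prefix", a), ("complex_extensions", b), ("unknown_business_terms", c)]).modify "missing_prefix" [] (· ++ [x])
    = PySem.Dict.mk [("missing_prefix", a ++ [x]), ("complex_extensions", b), ("unknown_business_terms", c)] := rfl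

theorem pv_step_ce (a b c : List String) (x : String) :
    (PySem.Dict.mk [("missing_prefix", a), ("complex_extensions", b), ("unknown_business_terms", c)]).modify "complex_extensions" [] (· ++ [x])
    = PySem.Dict.mk [("missing_prefix", a), ("complex_extensions", b ++ [x]), ("unknown_business_terms", c)] := rfl

theorem pv_step_ut (a b c : List String) (x : String) :
    (PySem.Dict.mk [("missing_prefix", a), ("complex_extensions", b), ("unknown_business_terms", c)]).modify "unknown_business_terms" [] (· ++ [x])
    = PySem.Dict.mk [("missing_prefix", a), ("complex_extensions", b), ("unknown_business_terms", c ++ [x])] := rfl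

-- loop invariant: A's fold over a dict holding buckets a, b, c appends each branch's filter
theorem pv_fold_inv (xs : List String) (a b c : List String) :
    xs.foldl
      (fun patterns concept =>
        if ¬ (PySem.Str.isIn ":" concept) then
          patterns.modify "missing_prefix" [] (· ++ [concept])
        else if PySem.Str.len concept > 40 then
          patterns.modify "complex_extensions" [] (· ++ [concept])
        else
          patterns.modify "unknown_business_terms" [] (· ++ [concept]))
      (PySem.Dict.mk [("missing_prefix", a), ("complex_extensions", b), ("unknown_business_terms", c)])
    = PySem.Dict.mk
        [("missing_prefix", a ++ xs.filter (fun s => ¬ PySem.Str.isIn ":" s)),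
         ("complex_extensions", b ++ xs.filter (fun s => PySem.Str.isIn ":" s && decide (PySem.Str.len s > 40))),
         ("unknown_business_terms", c ++ xs.filter (fun s => PySem.Str.isIn ":" s && decide (PySem.Str.len s ≤ 40)))] := by
  induction xs generalizing a b c with
  | nil => simp
  | cons x xs ih =>
    rw [List.foldl_cons]
    by_cases h1 : PySem.Str.isIn ":" x = true
    · have h1c : PySem.Chars.isIn [':'] x.toList = true := by simpa using h1
      by_cases h2 : PySem.Str.len x > 40
      · have h2c : 40 < x.length := by simpa using h2
        rw [if_neg (not_not.mpr h1), if_pos h2, pv_step_ce, ih]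
        simp [h1c, h2c, Nat.not_le.mpr h2c]
      · have h2c : x.length ≤ 40 := by
          simpa using Nat.le_of_not_lt (by simpa using h2)
        rw [if_neg (not_not.mpr h1), if_neg h2, pv_step_ut, ih]
        simp [h1c, h2c, Nat.not_lt.mpr h2c]
    · have h1c : PySem.Chars.isIn [':'] x.toList = false := by
        simpa using h1
      rw [if_pos (by simpa using h1), pv_step_mp, ih]
      simp [h1c]

-- ===== VERDICT (by name: the statement is the Claim_ definition above) =====
theorem identify_unmapped_patterns_py_spec : Claim_equal_identify_unmapped_patterns_py := by
  intro xs _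
  show _ = _
  unfold identify_unmapped_patterns_py
  have hinit : (((PySem.Dict.empty.insert "missing_prefix" ([] : List String)).insert "complex_extensions" []).insert
      "unknown_business_terms" [])
      = PySem.Dict.mk [("missing_prefix", []), ("complex_extensions", []), ("unknown_business_terms", [])] := by decide
  rw [hinit, pv_fold_inv]
  rfl
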